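-- pv_equiv track=rewrite | github.com/HamzaNIAU/willowv2 | suna-youtube-mcp/backend/youtube/oauth.py | get_capabilities_from_scopes
-- ===== SOURCE A (Python) =====
-- from typing import Dict, Optional, List, Any
--
-- SCOPE_CAPABILITIES = {
--     "https://www.googleapis.com/auth/youtube.upload": ["upload"],
--     "https://www.googleapis.com/auth/youtube.readonly": ["management"],
--     "https://www.googleapis.com/auth/yt-analytics.readonly": ["analytics"],
--     "https://www.googleapis.com/auth/yt-analytics-monetary.readonly": ["monetization"],
--     "https://www.googleapis.com/auth/youtube.force-ssl": ["streaming", "management"],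
--     "https://www.googleapis.com/auth/youtubepartner": ["monetization", "management"],
--     "https://www.googleapis.com/auth/youtube.channel-memberships.creator": ["monetization"]
-- }
--
-- def get_capabilities_from_scopes(scopes: List[str]) -> Dict[str, bool]:
--     """
--     Get capabilities based on granted scopes
--
--     Args:
--         scopes: List of OAuth scopes
--
--     Returns:
--         Dictionary of capabilities and their availability
--     """
--     capabilities = {
--         "upload": False,
--         "analytics": False,
--         "monetization": False,
--         "streaming": False,
--         "management": False
--     }
--
--     for scope in scopes:
--         scope_capabilities = SCOPE_CAPABILITIES.get(scope, [])
--         for capability in scope_capabilities: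
--             capabilities[capability] = True
--
--     return capabilities
-- ===== SOURCE B (Python) =====
-- # Inverted table: capability -> scopes granting it; one membership test per capability.
-- CAPABILITY_SCOPES = {
--     "upload": ["https://www.googleapis.com/auth/youtube.upload"],
--     "analytics": ["https://www.googleapis.com/auth/yt-analytics.readonly"],
--     "monetization": ["https://www.googleapis.com/auth/yt-analytics-monetary.readonly",
--                      "https://www.googleapis.com/auth/youtubepartner",
--                      "https://www.googleapis.com/auth/youtube.channel-memberships.creator"],
--     "streaming": ["https://www.googleapis.com/auth/youtube.force-ssl"],
--     "management": ["https://www.googleapis.com/auth/youtube.readonly",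
--                    "https://www.googleapis.com/auth/youtube.force-ssl",
--                    "https://www.googleapis.com/auth/youtubepartner"],
-- }
--
-- def get_capabilities_from_scopes(scopes):
--     granted = set(scopes)
--     return {cap: any(s in granted for s in caps)
--             for cap, caps in CAPABILITY_SCOPES.items()}
-- ===== Notes on version B (the rewrite author's own statement) =====
-- stated objective: alternative
-- what changed: Replaced the nested loop that mutates a capabilities dict per scope by a constant inverted table (capability -> granting scopes) and a single comprehension testing set-intersection against the granted scope set.
import Mathlib
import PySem

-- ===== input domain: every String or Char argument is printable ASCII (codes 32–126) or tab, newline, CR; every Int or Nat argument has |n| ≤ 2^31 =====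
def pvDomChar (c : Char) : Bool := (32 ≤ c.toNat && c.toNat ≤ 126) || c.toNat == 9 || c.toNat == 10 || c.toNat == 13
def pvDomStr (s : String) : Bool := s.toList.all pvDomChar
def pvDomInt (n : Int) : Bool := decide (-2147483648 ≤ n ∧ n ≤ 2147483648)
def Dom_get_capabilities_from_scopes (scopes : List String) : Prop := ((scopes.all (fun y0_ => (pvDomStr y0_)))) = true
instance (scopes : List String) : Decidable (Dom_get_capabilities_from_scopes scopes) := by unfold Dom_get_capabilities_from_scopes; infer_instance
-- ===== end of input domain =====

-- B replaces A's per-scope dict mutation by a constant inverted table (capability -> granting scopes)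
-- and one membership test per capability against the granted scope set (objective: alternative).

-- ===== PORT A =====
def SCOPE_CAPABILITIES : PySem.Dict String (List String) := PySem.Dict.ofList [
  ("https://www.googleapis.com/auth/youtube.upload", ["upload"]),
  ("https://www.googleapis.com/auth/youtube.readonly", ["management"]),
  ("https://www.googleapis.com/auth/yt-analytics.readonly", ["analytics"]),
  ("https://www.googleapis.com/auth/yt-analytics-monetary.readonly", ["monetization"]),
  ("https://www.googleapis.com/auth/youtube.force-ssl", ["streaming", "management"]),
  ("https://www.googleapis.com/auth/youtubepartner", ["monetization", "management"]),
  ("https://www.googleapis.com/auth/youtube.channel-memberships.creator", ["monetization"])]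

def get_capabilities_from_scopes (scopes : List String) : List (String × Bool) :=
  let capabilities : PySem.Dict String Bool := PySem.Dict.ofList [
    ("upload", false), ("analytics", false), ("monetization", false),
    ("streaming", false), ("management", false)]
  let capabilities := scopes.foldl (fun caps scope =>
    (SCOPE_CAPABILITIES.getD scope []).foldl (fun caps capability => caps.insert capability true) caps) capabilities
  capabilities.items

-- ===== PORT B =====
def CAPABILITY_SCOPES : PySem.Dict String (List String) := PySem.Dict.ofList [
  ("upload", ["https://www.googleapis.com/auth/youtube.upload"]),
  ("analytics", ["https://www.googleapis.com/auth/yt-analytics.readonly"]),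
  ("monetization", ["https://www.googleapis.com/auth/yt-analytics-monetary.readonly",
                    "https://www.googleapis.com/auth/youtubepartner",
                    "https://www.googleapis.com/auth/youtube.channel-memberships.creator"]),
  ("streaming", ["https://www.googleapis.com/auth/youtube.force-ssl"]),
  ("management", ["https://www.googleapis.com/auth/youtube.readonly",
                  "https://www.googleapis.com/auth/youtube.force-ssl",
                  "https://www.googleapis.com/auth/youtubepartner"])]

def get_capabilities_from_scopes_alt (scopes : List String) : List (String × Bool) :=
  let granted : PySem.Set String := PySem.Set.ofList scopes
  CAPABILITY_SCOPES.items.map (fun p => (p.1, p.2.any (fun s => granted.contains s)))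

-- ===== PRECONDITION & SPEC =====
def Spec_get_capabilities_from_scopes (scopes : List String) (out : List (String × Bool)) : Prop := out = get_capabilities_from_scopes_alt scopes
instance (scopes : List String) (out : List (String × Bool)) : Decidable (Spec_get_capabilities_from_scopes scopes out) := by unfold Spec_get_capabilities_from_scopes; infer_instance

-- ===== CLAIM (what is proved, stated in full; the proofs are below) =====
def Claim_equal_get_capabilities_from_scopes : Prop := ∀ (scopes : List String), Dom_get_capabilities_from_scopes scopes → Spec_get_capabilities_from_scopes scopes (get_capabilities_from_scopes scopes)

-- ===== LEMMAS AND PROOFS =====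

-- the two table constants as plain literal dicts
lemma SC_eq : SCOPE_CAPABILITIES = PySem.Dict.mk [
    ("https://www.googleapis.com/auth/youtube.upload", ["upload"]),
    ("https://www.googleapis.com/auth/youtube.readonly", ["management"]),
    ("https://www.googleapis.com/auth/yt-analytics.readonly", ["analytics"]),
    ("https://www.googleapis.com/auth/yt-analytics-monetary.readonly", ["monetization"]),
    ("https://www.googleapis.com/auth/youtube.force-ssl", ["streaming", "management"]),
    ("https://www.googleapis.com/auth/youtubepartner", ["monetization", "management"]),
    ("https://www.googleapis.com/auth/youtube.channel-memberships.creator", ["monetization"])] := by decide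
lemma CS_eq : CAPABILITY_SCOPES = PySem.Dict.mk [
    ("upload", ["https://www.googleapis.com/auth/youtube.upload"]),
    ("analytics", ["https://www.googleapis.com/auth/yt-analytics.readonly"]),
    ("monetization", ["https://www.googleapis.com/auth/yt-analytics-monetary.readonly",
                      "https://www.googleapis.com/auth/youtubepartner",
                      "https://www.googleapis.com/auth/youtube.channel-memberships.creator"]),
    ("streaming", ["https://www.googleapis.com/auth/youtube.force-ssl"]),
    ("management", ["https://www.googleapis.com/auth/youtube.readonly",
                    "https://www.googleapis.com/auth/youtube.force-ssl",
                    "https://www.googleapis.com/auth/youtubepartner"])] := by decide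

-- the 5-key capabilities dict of A with arbitrary boolean values
def mk5 (u a m z g : Bool) : PySem.Dict String Bool := PySem.Dict.mk [
  ("upload", u), ("analytics", a), ("monetization", m), ("streaming", z), ("management", g)]

-- one scope's effect on A's state, expressed through the inverted lists
set_option maxHeartbeats 1000000 in
lemma stepA_eq (u a m z g : Bool) (sc : String) :
    (SCOPE_CAPABILITIES.getD sc []).foldl (fun caps capability => caps.insert capability true) (mk5 u a m z g)
    = mk5 (u || (CAPABILITY_SCOPES.getD "upload" []).contains sc)
          (a || (CAPABILITY_SCOPES.getD "analytics" []).contains sc)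
          (m || (CAPABILITY_SCOPES.getD "monetization" []).contains sc)
          (z || (CAPABILITY_SCOPES.getD "streaming" []).contains sc)
          (g || (CAPABILITY_SCOPES.getD "management" []).contains sc) := by
  rw [SC_eq, CS_eq]
  simp only [PySem.Dict.getD, PySem.Dict.get?_mk_cons, beq_iff_eq, String.reduceEq,
    if_true, if_false, Option.getD_some]
  split_ifs <;> subst_vars <;>
    simp_all [mk5, PySem.Dict.insert, PySem.Dict.contains, PySem.Dict.get?, ne_comm]

lemma foldA_eq (u a m z g : Bool) (scopes : List String) :
    scopes.foldl (fun caps scope =>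
      (SCOPE_CAPABILITIES.getD scope []).foldl (fun caps capability => caps.insert capability true) caps) (mk5 u a m z g)
    = mk5 (u || scopes.any (fun sc => (CAPABILITY_SCOPES.getD "upload" []).contains sc))
          (a || scopes.any (fun sc => (CAPABILITY_SCOPES.getD "analytics" []).contains sc))
          (m || scopes.any (fun sc => (CAPABILITY_SCOPES.getD "monetization" []).contains sc))
          (z || scopes.any (fun sc => (CAPABILITY_SCOPES.getD "streaming" []).contains sc))
          (g || scopes.any (fun sc => (CAPABILITY_SCOPES.getD "management" []).contains sc)) := by
  induction scopes generalizing u a m z g with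
  | nil => simp
  | cons sc rest ih =>
    simp only [List.foldl_cons, stepA_eq, ih, List.any_cons, Bool.or_assoc]

lemma any_contains_comm (l1 l2 : List String) :
    l1.any (fun x => l2.contains x) = l2.any (fun y => l1.contains y) := by
  rw [Bool.eq_iff_iff]
  simp only [List.any_eq_true, List.contains_iff_mem]
  tauto

-- ===== VERDICT (by name: the statement is the Claim_ definition above) =====
theorem get_capabilities_from_scopes_spec : Claim_equal_get_capabilities_from_scopes := by
  intro scopes _
  unfold Spec_get_capabilities_from_scopes get_capabilities_from_scopes get_capabilities_from_scopes_alt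
  show (scopes.foldl _ (mk5 false false false false false)).items = _
  rw [foldA_eq, CS_eq]
  have hset : ∀ (l : List String), (l.any fun s => (PySem.Set.ofList scopes).contains s)
      = scopes.any fun sc => l.contains sc := by
    intro l
    rw [← any_contains_comm, Bool.eq_iff_iff]
    simp [List.any_eq_true, PySem.Set.contains, PySem.Set.mem_ofList]
  simp only [mk5, Bool.false_or, PySem.Dict.getD, PySem.Dict.get?_mk_cons, beq_iff_eq,
    String.reduceEq, if_true, if_false, Option.getD_some, List.map, hset]
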